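-- pv_equiv track=rewrite | github.com/arindamsaha1507/ramayana | main.py | search_results
-- ===== SOURCE A (Python) =====
-- def search_results(index, word, word_sets, primary=False) -> list[tuple]:
--     """Print search results."""
--
--     results = []
--
--     primary_word_set, secondary_word_set, verb_word_set = word_sets
--
--     if primary:
--         word_set = primary_word_set
--     else:
--         word_set = secondary_word_set
--
--     if word in word_set:
--         results.append((index, word, True))
--     elif "-" in word:
--         components = word.split("-")
--         for idd, component in enumerate(components):
--             if idd < len(components) - 1:
--                 rr = search_results(
--                     index,
--                     component,
--                     word_sets,
--                     primary=True,
--                 )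
--             else:
--                 rr = search_results(
--                     index,
--                     component,
--                     word_sets,
--                 )
--             results.extend(rr)
--     elif word in verb_word_set:
--         results.append((index, word, True))
--     else:
--         results.append((index, word, False))
--
--     return results
-- ===== SOURCE B (Python) =====
-- def search_results(index, word, word_sets, primary=False) -> list[tuple]:
--     """Print search results."""
--
--     primary_word_set, secondary_word_set, verb_word_set = word_sets
--
--     selected = primary_word_set if primary else secondary_word_set
--
--     if word not in selected and "-" in word:
--         components = word.split("-")
--         last = len(components) - 1
--         return [
--             (index, c,
--              c in (primary_word_set if i < last else secondary_word_set)
--              or c in verb_word_set)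
--             for i, c in enumerate(components)
--         ]
--
--     return [(index, word, word in selected or word in verb_word_set)]
-- ===== Notes on version B (the rewrite author's own statement) =====
-- stated objective: simpler
-- what changed: The depth-1 self-recursion over hyphen components is flattened into a single comprehension with an inlined boolean classifier (membership-or instead of the three-way if/elif chain), so the function is non-recursive and builds each result tuple directly.
import Mathlib
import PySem

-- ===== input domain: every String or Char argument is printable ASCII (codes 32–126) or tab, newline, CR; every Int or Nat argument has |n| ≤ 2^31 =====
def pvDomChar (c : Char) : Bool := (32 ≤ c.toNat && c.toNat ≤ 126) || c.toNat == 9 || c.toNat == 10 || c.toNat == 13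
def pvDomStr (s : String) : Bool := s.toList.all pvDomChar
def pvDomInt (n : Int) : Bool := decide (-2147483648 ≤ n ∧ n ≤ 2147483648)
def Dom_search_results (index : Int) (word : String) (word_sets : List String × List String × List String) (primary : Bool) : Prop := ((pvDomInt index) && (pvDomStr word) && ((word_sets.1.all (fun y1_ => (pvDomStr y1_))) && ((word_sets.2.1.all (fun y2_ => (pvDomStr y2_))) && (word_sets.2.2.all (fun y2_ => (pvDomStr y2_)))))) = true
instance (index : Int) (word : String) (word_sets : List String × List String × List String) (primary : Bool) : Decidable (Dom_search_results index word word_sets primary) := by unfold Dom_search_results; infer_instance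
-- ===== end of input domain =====

-- B replaces A's depth-1 self-recursion over hyphen components by a flat comprehension with an
-- inlined membership-or classifier (objective: simpler, non-recursive).

-- ===== PORT A =====
-- Literal transliteration of A. A recurses on the components of word.split("-"); since split
-- components never contain the separator, the recursion depth is at most 1, so the fuel guard
-- (fuel = 2, returning [] only at fuel 0, which is unreachable from `search_results`) merely
-- makes the same computation total.
def search_resultsF : Nat → Int → String → (List String × List String × List String) → Bool → List (Int × String × Bool)
  | 0, _, _, _, _ => []
  | (fuel+1), index, word, word_sets, primary =>
    let word_set := if primary then word_sets.1 else word_sets.2.1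
    if word_set.contains word then
      [(index, word, true)]
    else if PySem.Str.isIn "-" word then
      -- components = word.split("-")  (sep ≠ "", so Python's split = PySem.Chars.splitOn)
      let components := (PySem.Chars.splitOn word.toList "-".toList).map String.ofList
      (PySem.List.enumerate components).foldl
        (fun results p =>
          results ++
            (if p.1 < (components.length : Int) - 1
             then search_resultsF fuel index p.2 word_sets true
             else search_resultsF fuel index p.2 word_sets false))
        []
    else if word_sets.2.2.contains word then
      [(index, word, true)]
    else
      [(index, word, false)]

def search_results (index : Int) (word : String) (word_sets : List String × List String × List String) (primary : Bool) : List (Int × String × Bool) :=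
  search_resultsF 2 index word word_sets primary

-- ===== PORT B =====
def search_results_alt (index : Int) (word : String) (word_sets : List String × List String × List String) (primary : Bool) : List (Int × String × Bool) :=
  let selected := if primary then word_sets.1 else word_sets.2.1
  if !selected.contains word && PySem.Str.isIn "-" word then
    let components := (PySem.Chars.splitOn word.toList "-".toList).map String.ofList
    let last := (components.length : Int) - 1
    (PySem.List.enumerate components).map (fun p =>
      (index, p.2,
        (if p.1 < last then word_sets.1 else word_sets.2.1).contains p.2
          || word_sets.2.2.contains p.2))
  else
    [(index, word, selected.contains word || word_sets.2.2.contains word)]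

-- ===== PRECONDITION & SPEC =====
def Spec_search_results (index : Int) (word : String) (word_sets : List String × List String × List String) (primary : Bool) (out : List (Int × String × Bool)) : Prop := out = search_results_alt index word word_sets primary
instance (index : Int) (word : String) (word_sets : List String × List String × List String) (primary : Bool) (out : List (Int × String × Bool)) : Decidable (Spec_search_results index word word_sets primary out) := by unfold Spec_search_results; infer_instance

-- ===== CLAIM (what is proved, stated in full; the proofs are below) =====
def Claim_equal_search_results : Prop := ∀ (index : Int) (word : String) (word_sets : List String × List String × List String) (primary : Bool), Dom_search_results index word word_sets primary → Spec_search_results index word word_sets primary (search_results index word word_sets primary)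

-- ===== LEMMAS AND PROOFS =====

-- Components produced by splitting on "-" contain no '-'.
lemma splitOn_go_no_dash (fuel : Nat) : ∀ (l cur : List Char) (acc : List (List Char)),
    l.length < fuel → '-' ∉ cur → (∀ cs ∈ acc, '-' ∉ cs) →
    ∀ cs ∈ PySem.Chars.splitOn.go ['-'] fuel l cur acc, '-' ∉ cs := by
  induction fuel with
  | zero => intro l cur acc h; exact absurd h (by omega)
  | succ n ih =>
    intro l cur acc hlen hcur hacc cs hcs
    cases l with
    | nil =>
      simp only [PySem.Chars.splitOn.go, List.mem_reverse, List.mem_cons] at hcs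
      rcases hcs with h | h
      · subst h; simpa using hcur
      · exact hacc cs h
    | cons c rest =>
      by_cases hpre : List.isPrefixOf ['-'] (c :: rest)
      · rw [show PySem.Chars.splitOn.go ['-'] (n+1) (c :: rest) cur acc
              = PySem.Chars.splitOn.go ['-'] n rest [] (cur.reverse :: acc) from by
            simp [PySem.Chars.splitOn.go, hpre]] at hcs
        refine ih _ _ _ (by simp at hlen ⊢; omega) (by simp) ?_ cs hcs
        intro ds hds
        rcases List.mem_cons.mp hds with h | h
        · subst h; simpa using hcur
        · exact hacc ds h
      · have hc : c ≠ '-' := by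
          intro h; exact hpre (by simp [List.isPrefixOf, h])
        rw [show PySem.Chars.splitOn.go ['-'] (n+1) (c :: rest) cur acc
              = PySem.Chars.splitOn.go ['-'] n rest (c :: cur) acc from by
            simp [PySem.Chars.splitOn.go, hpre]] at hcs
        refine ih _ _ _ (by simp at hlen ⊢; omega) ?_ hacc cs hcs
        intro h
        rcases List.mem_cons.mp h with h | h
        · exact hc h.symm
        · exact hcur h

lemma splitOn_no_dash (s : List Char) : ∀ cs ∈ PySem.Chars.splitOn s ['-'], '-' ∉ cs := by
  intro cs hcs
  exact splitOn_go_no_dash (s.length + 1) s [] [] (by omega) (by simp) (by simp) cs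
    (by simpa [PySem.Chars.splitOn] using hcs)

-- No-hyphen component: the inner call of A is the inlined classifier of B.
lemma search_resultsF_one (index : Int) (c : String) (ws : List String × List String × List String)
    (b : Bool) (h : PySem.Str.isIn "-" c = false) :
    search_resultsF 1 index c ws b
      = [(index, c, (if b then ws.1 else ws.2.1).contains c || ws.2.2.contains c)] := by
  have h' : PySem.Chars.isIn ['-'] c.toList = false := by simpa [PySem.Str.isIn] using h
  by_cases h1 : c ∈ (if b then ws.1 else ws.2.1) <;>
    by_cases h2 : c ∈ ws.2.2 <;>
      simp [search_resultsF, h', h1, h2]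

-- A's extend-loop over the enumerated components equals B's map.
lemma loop_eq_map (index : Int) (ws : List String × List String × List String) (n : Int) :
    ∀ (ps : List (Int × String)) (acc : List (Int × String × Bool)),
    (∀ p ∈ ps, PySem.Str.isIn "-" p.2 = false) →
    ps.foldl
      (fun results p =>
        results ++
          (if p.1 < n then search_resultsF 1 index p.2 ws true
           else search_resultsF 1 index p.2 ws false)) acc
    = acc ++ ps.map (fun p =>
        (index, p.2, (if p.1 < n then ws.1 else ws.2.1).contains p.2 || ws.2.2.contains p.2)) := by
  intro ps
  induction ps with
  | nil => intro acc _; simp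
  | cons p ps ih =>
    intro acc h
    have hp := h p (List.mem_cons_self ..)
    simp only [List.foldl_cons, List.map_cons]
    rw [ih _ (fun q hq => h q (List.mem_cons_of_mem _ hq))]
    by_cases hlt : p.1 < n <;>
      simp [hlt, search_resultsF_one index p.2 ws _ hp]

lemma mem_components_no_dash (word : String) (p : Int × String)
    (hp : p ∈ PySem.List.enumerate ((PySem.Chars.splitOn word.toList "-".toList).map String.ofList)) :
    PySem.Str.isIn "-" p.2 = false := by
  rcases (PySem.List.mem_enumerate_iff _ _ _).mp hp with ⟨k, hk, rfl⟩
  have hmem : ((PySem.Chars.splitOn word.toList "-".toList).map String.ofList)[k] ∈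
      (PySem.Chars.splitOn word.toList "-".toList).map String.ofList := List.getElem_mem hk
  rcases List.mem_map.mp hmem with ⟨cs, hcsmem, hcs⟩
  have hnod : '-' ∉ cs := splitOn_no_dash word.toList cs (by simpa using hcsmem)
  rw [← hcs]
  have : PySem.Chars.isIn "-".toList (String.ofList cs).toList = false := by
    simp only [String.toList_ofList]
    rw [PySem.Chars.isIn_eq_false_iff]
    intro hinf
    exact hnod ((List.singleton_infix_iff _ _).mp (by simpa using hinf))
  simpa [PySem.Str.isIn] using this

-- One-step unfolding of A's recursion (keeps the inner calls at fuel 1 un-unfolded).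
lemma F_succ (fuel : Nat) (index : Int) (word : String)
    (ws : List String × List String × List String) (primary : Bool) :
    search_resultsF (fuel+1) index word ws primary =
      (if (if primary then ws.1 else ws.2.1).contains word then [(index, word, true)]
       else if PySem.Str.isIn "-" word then
         (PySem.List.enumerate ((PySem.Chars.splitOn word.toList "-".toList).map String.ofList)).foldl
           (fun results p => results ++
             (if p.1 < (((PySem.Chars.splitOn word.toList "-".toList).map String.ofList).length : Int) - 1
              then search_resultsF fuel index p.2 ws true
              else search_resultsF fuel index p.2 ws false)) []
       else if ws.2.2.contains word then [(index, word, true)] else [(index, word, false)]) := rfl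

-- ===== VERDICT (by name: the statement is the Claim_ definition above) =====
theorem search_results_spec : Claim_equal_search_results := by
  intro index word ws primary _
  show search_results index word ws primary = search_results_alt index word ws primary
  rw [show search_results index word ws primary = search_resultsF (1+1) index word ws primary from rfl,
      F_succ,
      loop_eq_map index ws ((((PySem.Chars.splitOn word.toList "-".toList).map String.ofList).length : Int) - 1)
        (PySem.List.enumerate ((PySem.Chars.splitOn word.toList "-".toList).map String.ofList)) []
        (fun p hp => mem_components_no_dash word p hp)]
  by_cases hsel : word ∈ (if primary then ws.1 else ws.2.1)
  · simp [search_results_alt, hsel]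
  · by_cases hdash : PySem.Chars.isIn ['-'] word.toList = true
    · simp [search_results_alt, hsel, hdash]
    · by_cases hv : word ∈ ws.2.2 <;> simp [search_results_alt, hsel, hdash, hv]
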